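-- pv_equiv track=rewrite | github.com/IDEA-CCNL/Fengshenbang-LM | fengshen/examples/pretrain_uie/data_processing/universal_ie/task_format/ChineseNER.py | iob1_tags_to_spans
-- ===== SOURCE A (Python) =====
-- from typing import List, Optional, Tuple, Set
--
-- def _iob1_start_of_chunk(
--     prev_bio_tag: Optional[str],
--     prev_conll_tag: Optional[str],
--     curr_bio_tag: str,
--     curr_conll_tag: str,
-- ) -> bool:
--     if curr_bio_tag == "B":
--         return True
--     if curr_bio_tag == "I" and prev_bio_tag == "O":
--         return True
--     if curr_bio_tag != "O" and prev_conll_tag != curr_conll_tag: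
--         return True
--     return False
--
-- def iob1_tags_to_spans(
--     tag_sequence: List[str], classes_to_ignore: List[str] = None
-- ) -> List[Tuple[str, Tuple[int, int]]]:
--     """
--     Given a sequence corresponding to IOB1 tags, extracts spans.
--     Spans are inclusive and can be of zero length, representing a single word span.
--     Ill-formed spans are also included (i.e., those where "B-LABEL" is not preceded
--     by "I-LABEL" or "B-LABEL").
--     # Parameters
--     tag_sequence : `List[str]`, required.
--         The integer class labels for a sequence.
--     classes_to_ignore : `List[str]`, optional (default = `None`).
--         A list of string class labels `excluding` the bio tag
--         which should be ignored when extracting spans.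
--     # Returns
--     spans : `List[TypedStringSpan]`
--         The typed, extracted spans from the sequence, in the format (label, (span_start, span_end)).
--         Note that the label `does not` contain any BIO tag prefixes.
--     """
--     classes_to_ignore = classes_to_ignore or []
--     spans: Set[Tuple[str, Tuple[int, int]]] = set()
--     span_start = 0
--     span_end = 0
--     active_conll_tag = None
--     prev_bio_tag = None
--     prev_conll_tag = None
--     for index, string_tag in enumerate(tag_sequence):
--         curr_bio_tag = string_tag[0]
--         curr_conll_tag = string_tag[2:]
--
--         if curr_bio_tag not in ["B", "I", "O"]:
--             raise RuntimeError('Invalid tag sequence %s' % tag_sequence)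
--         if curr_bio_tag == "O" or curr_conll_tag in classes_to_ignore:
--             # The span has ended.
--             if active_conll_tag is not None:
--                 spans.add((active_conll_tag, (span_start, span_end)))
--             active_conll_tag = None
--         elif _iob1_start_of_chunk(prev_bio_tag, prev_conll_tag, curr_bio_tag, curr_conll_tag):
--             # We are entering a new span; reset indices
--             # and active tag to new span.
--             if active_conll_tag is not None:
--                 spans.add((active_conll_tag, (span_start, span_end)))
--             active_conll_tag = curr_conll_tag
--             span_start = index
--             span_end = index
--         else:
--             # bio_tag == "I" and curr_conll_tag == active_conll_tag
--             # We're continuing a span.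
--             span_end += 1
--
--         prev_bio_tag = string_tag[0]
--         prev_conll_tag = string_tag[2:]
--     # Last token might have been a part of a valid span.
--     if active_conll_tag is not None:
--         spans.add((active_conll_tag, (span_start, span_end)))
--     return list(spans)
-- ===== SOURCE B (Python) =====
-- from typing import List, Optional, Tuple
--
-- def iob1_tags_to_spans(
--     tag_sequence: List[str], classes_to_ignore: List[str] = None
-- ) -> List[Tuple[str, Tuple[int, int]]]:
--     classes_to_ignore = classes_to_ignore or []
--     spans = set()
--     n = len(tag_sequence)
--     i = 0
--     while i < n:
--         bio = tag_sequence[i][0]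
--         if bio not in ("B", "I", "O"):
--             raise RuntimeError('Invalid tag sequence %s' % tag_sequence)
--         conll = tag_sequence[i][2:]
--         if bio == "O" or conll in classes_to_ignore:
--             i += 1
--             continue
--         # a chunk starts here; consume its IOB1 continuation tokens
--         j = i + 1
--         while j < n and tag_sequence[j][0] == "I" and tag_sequence[j][2:] == conll:
--             j += 1
--         spans.add((conll, (i, j - 1)))
--         i = j
--     return list(spans)
-- ===== Notes on version B (the rewrite author's own statement) =====
-- stated objective: simpler
-- what changed: Replaces A's single fold carrying span_start/span_end/active/prev_bio/prev_conll state and a start-of-chunk predicate by an index-based outer loop that, at each chunk start, consumes the chunk's continuation tokens with an inner scan and emits the span directly.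
import Mathlib
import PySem

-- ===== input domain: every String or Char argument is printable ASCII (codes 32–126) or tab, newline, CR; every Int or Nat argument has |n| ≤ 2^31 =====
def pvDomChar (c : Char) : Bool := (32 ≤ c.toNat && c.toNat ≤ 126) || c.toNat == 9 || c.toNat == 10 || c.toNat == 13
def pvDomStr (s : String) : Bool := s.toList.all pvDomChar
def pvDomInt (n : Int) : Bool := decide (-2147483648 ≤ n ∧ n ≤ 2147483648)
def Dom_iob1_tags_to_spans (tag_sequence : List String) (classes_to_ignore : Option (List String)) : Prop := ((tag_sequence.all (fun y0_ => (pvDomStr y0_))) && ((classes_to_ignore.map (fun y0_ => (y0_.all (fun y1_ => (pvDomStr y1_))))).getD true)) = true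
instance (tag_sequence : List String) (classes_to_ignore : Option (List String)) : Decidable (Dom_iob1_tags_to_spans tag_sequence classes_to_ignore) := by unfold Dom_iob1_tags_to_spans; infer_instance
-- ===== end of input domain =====

-- B replaces A's one-pass fold with prev-tag/active-span bookkeeping by an index-based outer
-- scan that, at each chunk start, consumes the chunk's continuation tokens with an inner scan
-- (objective: simpler — no prev_bio/prev_conll/active state and no start-of-chunk predicate).
-- Both programs return list(set(...)); the ports model the set in insertion order, which is
-- identical for the two programs.

-- ===== PORT A =====
-- fold state: (spans, span_start, span_end, active_conll_tag, prev_bio_tag, prev_conll_tag)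
abbrev pvStateA := PySem.Set (String × (Int × Int)) × Int × Int × Option String × Option Char × Option String

def pv_iob1_start_of_chunk (prev_bio_tag : Option Char) (prev_conll_tag : Option String)
    (curr_bio_tag : Char) (curr_conll_tag : String) : Bool :=
  if curr_bio_tag == 'B' then true
  else if curr_bio_tag == 'I' && prev_bio_tag == some 'O' then true
  else if curr_bio_tag != 'O' && prev_conll_tag != some curr_conll_tag then true
  else false

def pvStepA (ignore : List String) (st : pvStateA) (p : Int × String) : pvStateA :=
  let (spans, span_start, span_end, active, prev_bio, prev_conll) := st
  let (index, string_tag) := p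
  match PySem.Str.pyGet? string_tag 0 with
  | none => st        -- string_tag[0] on "" raises IndexError: excluded by Pre_
  | some curr_bio =>
    if ¬ (curr_bio = 'B' ∨ curr_bio = 'I' ∨ curr_bio = 'O') then st   -- RuntimeError: excluded by Pre_
    else
      let curr_conll := PySem.Str.slice string_tag (some 2) none
      if curr_bio == 'O' || ignore.contains curr_conll then
        let spans' := match active with
          | some a => PySem.Set.add spans (a, (span_start, span_end))
          | none => spans
        (spans', span_start, span_end, none, some curr_bio, some curr_conll)
      else if pv_iob1_start_of_chunk prev_bio prev_conll curr_bio curr_conll then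
        let spans' := match active with
          | some a => PySem.Set.add spans (a, (span_start, span_end))
          | none => spans
        (spans', index, index, some curr_conll, some curr_bio, some curr_conll)
      else
        (spans, span_start, span_end + 1, active, some curr_bio, some curr_conll)

def pvFinalA (st : pvStateA) : List (String × (Int × Int)) :=
  let (spans, span_start, span_end, active, _, _) := st
  match active with
  | some a => PySem.Set.add spans (a, (span_start, span_end))
  | none => spans

def iob1_tags_to_spans (tag_sequence : List String) (classes_to_ignore : Option (List String)) : List (String × (Int × Int)) :=
  let ignore := classes_to_ignore.getD []     -- classes_to_ignore or []
  pvFinalA ((PySem.List.enumerate tag_sequence 0).foldl (pvStepA ignore)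
    (PySem.Set.empty, 0, 0, none, none, none))

-- ===== PORT B =====
-- number of leading continuation tokens ( tag[0]=="I" and tag[2:]==conll ) — B's inner while
def pvChunkLen (conll : String) : List String → Nat
  | [] => 0
  | t :: rest =>
    if PySem.Str.pyGet? t 0 == some 'I' && PySem.Str.slice t (some 2) none == conll then
      pvChunkLen conll rest + 1
    else 0

-- B's outer while-loop over the remaining tags, i = index of the current position
def pvGoB (ignore : List String) (i : Int) : List String → PySem.Set (String × (Int × Int)) → PySem.Set (String × (Int × Int))
  | [], spans => spans
  | t :: rest, spans =>
    match PySem.Str.pyGet? t 0 with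
    | none => spans     -- IndexError: excluded by Pre_
    | some bio =>
      if ¬ (bio = 'B' ∨ bio = 'I' ∨ bio = 'O') then spans   -- RuntimeError: excluded by Pre_
      else
        let conll := PySem.Str.slice t (some 2) none
        if bio == 'O' || ignore.contains conll then
          pvGoB ignore (i + 1) rest spans
        else
          let k := pvChunkLen conll rest
          pvGoB ignore (i + 1 + k) (rest.drop k) (PySem.Set.add spans (conll, (i, i + k)))
termination_by l => l.length
decreasing_by
all_goals simp [List.length_drop]

def iob1_tags_to_spans_alt (tag_sequence : List String) (classes_to_ignore : Option (List String)) : List (String × (Int × Int)) :=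
  pvGoB (classes_to_ignore.getD []) 0 tag_sequence PySem.Set.empty

-- ===== PRECONDITION & SPEC =====
-- Pre_ excludes exactly the inputs on which A raises: a tag that is empty (IndexError on tag[0])
-- or whose first character is not 'B'/'I'/'O' (RuntimeError).
def Pre_iob1_tags_to_spans (tag_sequence : List String) (classes_to_ignore : Option (List String)) : Prop :=
  ∀ t ∈ tag_sequence, PySem.Str.pyGet? t 0 = some 'B' ∨ PySem.Str.pyGet? t 0 = some 'I' ∨ PySem.Str.pyGet? t 0 = some 'O'
instance (tag_sequence : List String) (classes_to_ignore : Option (List String)) : Decidable (Pre_iob1_tags_to_spans tag_sequence classes_to_ignore) := by unfold Pre_iob1_tags_to_spans; infer_instance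

def pvWitness_iob1_tags_to_spans : List String × Option (List String) :=
  (["B-PER", "I-PER", "O", "I-LOC", "B-LOC"], some ["MISC"])

def Spec_iob1_tags_to_spans (tag_sequence : List String) (classes_to_ignore : Option (List String)) (out : List (String × (Int × Int))) : Prop := out = iob1_tags_to_spans_alt tag_sequence classes_to_ignore
instance (tag_sequence : List String) (classes_to_ignore : Option (List String)) (out : List (String × (Int × Int))) : Decidable (Spec_iob1_tags_to_spans tag_sequence classes_to_ignore out) := by unfold Spec_iob1_tags_to_spans; infer_instance

-- ===== CLAIM (what is proved, stated in full; the proofs are below) =====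
def Claim_equal_iob1_tags_to_spans : Prop := ∀ (tag_sequence : List String) (classes_to_ignore : Option (List String)), Dom_iob1_tags_to_spans tag_sequence classes_to_ignore → Pre_iob1_tags_to_spans tag_sequence classes_to_ignore → Spec_iob1_tags_to_spans tag_sequence classes_to_ignore (iob1_tags_to_spans tag_sequence classes_to_ignore)

-- ===== LEMMAS AND PROOFS =====

-- invariant of A's fold whenever no span is active: the previous token (if any) was 'O' or ignored
def pvInvNone (ignore : List String) (pb : Option Char) (pc : Option String) : Prop :=
  (pb = none ∧ pc = none) ∨ pb = some 'O' ∨ (∃ c', pc = some c' ∧ c' ∈ ignore)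

set_option maxHeartbeats 1000000 in
theorem pv_master (l : List String) (ignore : List String) :
    (∀ t ∈ l, PySem.Str.pyGet? t 0 = some 'B' ∨ PySem.Str.pyGet? t 0 = some 'I' ∨ PySem.Str.pyGet? t 0 = some 'O') →
    ∀ (i : Int) (spans : PySem.Set (String × (Int × Int))),
    ((∀ s0 e0 pb pc, pvInvNone ignore pb pc →
        pvFinalA ((PySem.List.enumerate l i).foldl (pvStepA ignore) (spans, s0, e0, none, pb, pc))
          = pvGoB ignore i l spans)
     ∧ (∀ s e c (b : Char), c ∉ ignore → (b = 'B' ∨ b = 'I') →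
        pvFinalA ((PySem.List.enumerate l i).foldl (pvStepA ignore) (spans, s, e, some c, some b, some c))
          = pvGoB ignore (i + pvChunkLen c l) (l.drop (pvChunkLen c l))
              (PySem.Set.add spans (c, (s, e + pvChunkLen c l))))) := by
  induction l with
  | nil =>
    intro _ i spans
    refine ⟨fun s0 e0 pb pc _ => by simp [PySem.List.enumerate, pvFinalA, pvGoB],
            fun s e c b _ _ => by simp [PySem.List.enumerate, pvFinalA, pvGoB, pvChunkLen]⟩
  | cons t rest ih =>
    intro hval i spans
    have hrest := ih (fun x hx => hval x (List.mem_cons_of_mem _ hx))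
    obtain ⟨b, hb, hv⟩ : ∃ b, PySem.Str.pyGet? t 0 = some b ∧ (b = 'B' ∨ b = 'I' ∨ b = 'O') := by
      rcases hval t List.mem_cons_self with h | h | h <;> exact ⟨_, h, by simp⟩
    have hb' : PySem.List.pyGet? t.toList 0 = some b := by simpa using hb
    have hv' : ¬ (¬ b = 'B' ∧ ¬ b = 'I' ∧ ¬ b = 'O') := by tauto
    constructor
    · -- no active span
      intro s0 e0 pb pc hinv
      rw [PySem.List.enumerate_cons, List.foldl_cons]
      by_cases hO : (b = 'O' ∨ PySem.Str.slice t (some 2) none ∈ ignore)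
      · have hstep : pvStepA ignore (spans, s0, e0, none, pb, pc) (i, t)
            = (spans, s0, e0, none, some b, some (PySem.Str.slice t (some 2) none)) := by
          simp [pvStepA, hb', hv', hO]
        rw [hstep]
        have hinv' : pvInvNone ignore (some b) (some (PySem.Str.slice t (some 2) none)) := by
          rcases hO with h | h
          · exact Or.inr (Or.inl (by rw [h]))
          · exact Or.inr (Or.inr ⟨_, rfl, h⟩)
        rw [(hrest (i + 1) spans).1 s0 e0 _ _ hinv']
        simp [pvGoB, hb', hv', hO]
      · push_neg at hO
        obtain ⟨hbO, hcontains⟩ := hO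
        have hbBI : b = 'B' ∨ b = 'I' := by tauto
        have hstart : pv_iob1_start_of_chunk pb pc b (PySem.Str.slice t (some 2) none) = true := by
          rcases hbBI with h | h
          · simp [pv_iob1_start_of_chunk, h]
          · rcases hinv with ⟨hpb, hpc⟩ | hpb | ⟨c2, hpc, hc2⟩
            · simp [pv_iob1_start_of_chunk, h, hpb, hpc]
            · simp [pv_iob1_start_of_chunk, h, hpb]
            · have hne : c2 ≠ PySem.Str.slice t (some 2) none := by
                intro he; rw [he] at hc2; exact hcontains hc2
              simp [pv_iob1_start_of_chunk, h, hpc, hne]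
        have hstep : pvStepA ignore (spans, s0, e0, none, pb, pc) (i, t)
            = (spans, i, i, some (PySem.Str.slice t (some 2) none), some b,
               some (PySem.Str.slice t (some 2) none)) := by
          simp [pvStepA, hb', hv', hbO, hcontains, hstart]
          tauto
        rw [hstep, (hrest (i + 1) spans).2 i i _ b hcontains hbBI]
        simp [pvGoB, hb', hv', hbO, hcontains]
        tauto
    · -- active span (c, (s, e)), previous token was (b0, c) with b0 ∈ {B, I}
      intro s e c b0 hcnot hb0
      rw [PySem.List.enumerate_cons, List.foldl_cons]
      have hb0O : ¬ b0 = 'O' := by rcases hb0 with h | h <;> simp [h]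
      by_cases hcont : (b = 'I' ∧ PySem.Str.slice t (some 2) none = c)
      · -- continuation token
        obtain ⟨hbI, hcc⟩ := hcont
        have hO : ¬ (b = 'O' ∨ PySem.Str.slice t (some 2) none ∈ ignore) := by
          rw [hbI, hcc]; simpa using hcnot
        have hstart : pv_iob1_start_of_chunk (some b0) (some c) b (PySem.Str.slice t (some 2) none) = false := by
          rcases hb0 with h | h <;> simp [pv_iob1_start_of_chunk, hbI, hcc, h]
        have hstep : pvStepA ignore (spans, s, e, some c, some b0, some c) (i, t)
            = (spans, s, e + 1, some c, some b, some (PySem.Str.slice t (some 2) none)) := by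
          simp [pvStepA, hb', hv', hO, hstart]
        rw [hstep, hcc, hbI]
        rw [(hrest (i + 1) spans).2 s (e + 1) c 'I' hcnot (Or.inr rfl)]
        have hk : pvChunkLen c (t :: rest) = pvChunkLen c rest + 1 := by
          rw [pvChunkLen, if_pos]
          simp [hb, ← hbI ▸ hb, hcc, hbI]
        rw [hk, List.drop_succ_cons]
        have h1 : i + ((pvChunkLen c rest + 1 : Nat) : Int) = i + 1 + pvChunkLen c rest := by
          push_cast; ring
        have h2 : e + ((pvChunkLen c rest + 1 : Nat) : Int) = e + 1 + pvChunkLen c rest := by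
          push_cast; ring
        rw [h1, h2]
      · -- the chunk breaks at t
        have hk : pvChunkLen c (t :: rest) = 0 := by
          rw [pvChunkLen, if_neg]
          simp only [Bool.and_eq_true, beq_iff_eq, not_and]
          intro h1 h2
          exact hcont ⟨by rw [hb] at h1; exact Option.some_inj.mp h1, h2⟩
        rw [hk]
        simp only [List.drop_zero, Nat.cast_zero, add_zero]
        by_cases hO : (b = 'O' ∨ PySem.Str.slice t (some 2) none ∈ ignore)
        · have hstep : pvStepA ignore (spans, s, e, some c, some b0, some c) (i, t)
              = (PySem.Set.add spans (c, (s, e)), s, e, none, some b,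
                 some (PySem.Str.slice t (some 2) none)) := by
            simp [pvStepA, hb', hv', hO]
          have hinv' : pvInvNone ignore (some b) (some (PySem.Str.slice t (some 2) none)) := by
            rcases hO with h | h
            · exact Or.inr (Or.inl (by rw [h]))
            · exact Or.inr (Or.inr ⟨_, rfl, h⟩)
          rw [hstep, (hrest (i + 1) (PySem.Set.add spans (c, (s, e)))).1 s e _ _ hinv']
          simp [pvGoB, hb', hv', hO]
        · push_neg at hO
          obtain ⟨hbO, hcontains⟩ := hO
          have hbBI : b = 'B' ∨ b = 'I' := by tauto
          have hstart : pv_iob1_start_of_chunk (some b0) (some c) b (PySem.Str.slice t (some 2) none) = true := by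
            rcases hbBI with h | h
            · simp [pv_iob1_start_of_chunk, h]
            · have hcc : ¬ c = PySem.Str.slice t (some 2) none := by
                intro he; exact hcont ⟨h, he.symm⟩
              simp [pv_iob1_start_of_chunk, h, hb0O, hcc]
          have hstep : pvStepA ignore (spans, s, e, some c, some b0, some c) (i, t)
              = (PySem.Set.add spans (c, (s, e)), i, i,
                 some (PySem.Str.slice t (some 2) none), some b,
                 some (PySem.Str.slice t (some 2) none)) := by
            simp [pvStepA, hb', hv', hbO, hcontains, hstart]
            tauto
          rw [hstep,
            (hrest (i + 1) (PySem.Set.add spans (c, (s, e)))).2 i i _ b hcontains hbBI]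
          simp [pvGoB, hb', hv', hbO, hcontains]
          tauto

-- ===== VERDICT (by name: the statement is the Claim_ definition above) =====
theorem iob1_tags_to_spans_spec : Claim_equal_iob1_tags_to_spans := by
  intro ts cl _hdom hpre
  unfold Spec_iob1_tags_to_spans iob1_tags_to_spans iob1_tags_to_spans_alt
  exact (pv_master ts (cl.getD []) hpre 0 PySem.Set.empty).1 0 0 none none (Or.inl ⟨rfl, rfl⟩)
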